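-- pv_equiv track=rewrite | github.com/epic-rg/Learning-Python | foundation3-intermediate/anyBaseToAnyBase.py | deciToAnyBase
-- ===== SOURCE A (Python) =====
-- def deciToAnyBase(num, base):
--     baseNum = 0
--     x = 0
--
--     while not num==0:
--         q = num%base
--
--         baseNum += q*(10**x)
--         x+=1
--         num//=base
--
--     return baseNum
-- ===== SOURCE B (Python) =====
-- def deciToAnyBase(num, base):
--     digits = []
--     while num != 0:
--         digits.append(num % base)
--         num //= base
--     result = 0
--     for d in reversed(digits):
--         result = result * 10 + d
--     return result
-- ===== Notes on version B (the rewrite author's own statement) =====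
-- stated objective: alternative
-- what changed: Replaced A's single loop with a power-of-ten accumulator by two staged passes: first collect the base digits into a list, then Horner-pack them in decimal by folding over the reversed list.
import Mathlib
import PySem

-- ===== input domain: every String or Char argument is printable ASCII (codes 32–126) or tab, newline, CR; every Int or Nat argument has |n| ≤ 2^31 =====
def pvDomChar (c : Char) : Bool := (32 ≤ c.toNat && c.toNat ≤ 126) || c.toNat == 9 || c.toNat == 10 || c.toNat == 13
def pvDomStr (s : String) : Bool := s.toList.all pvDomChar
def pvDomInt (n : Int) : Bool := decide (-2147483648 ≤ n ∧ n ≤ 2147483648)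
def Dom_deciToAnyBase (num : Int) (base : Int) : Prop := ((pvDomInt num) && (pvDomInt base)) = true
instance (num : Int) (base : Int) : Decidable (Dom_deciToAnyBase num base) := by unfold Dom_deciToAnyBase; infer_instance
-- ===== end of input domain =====

-- B splits A's single accumulator loop into two staged passes (collect base digits into a
-- list, then Horner-pack them in decimal over the reversed list); return value only.

-- ===== PORT A =====
-- A's while loop, state (num, baseNum, x); fuel only makes the recursion total (100 steps
-- cover every terminating run on Dom's 32-bit ints; non-terminating inputs are outside Pre_).
def deciToAnyBaseLoop (fuel : Nat) (num : Int) (baseNum : Int) (x : Nat) (base : Int) : Int :=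
  match fuel with
  | 0 => baseNum
  | fuel + 1 =>
    if num == 0 then baseNum
    else
      let q := PySem.Int.mod num base
      deciToAnyBaseLoop fuel (PySem.Int.floordiv num base) (baseNum + q * (10 : Int) ^ x) (x + 1) base

def deciToAnyBase (num : Int) (base : Int) : Int :=
  deciToAnyBaseLoop 100 num 0 0 base

-- ===== PORT B =====
-- pass 1 of Source B: the digits list, least-significant first (fuel as for A's loop)
def deciDigits (fuel : Nat) (num : Int) (base : Int) : List Int :=
  match fuel with
  | 0 => []
  | fuel + 1 =>
    if num == 0 then []
    else PySem.Int.mod num base :: deciDigits fuel (PySem.Int.floordiv num base) base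

def deciToAnyBase_alt (num : Int) (base : Int) : Int :=
  -- pass 2 of Source B: 'for d in reversed(digits): result = result * 10 + d'
  (deciDigits 100 num base).reverse.foldl (fun result d => result * 10 + d) 0

-- ===== PRECONDITION & SPEC =====
-- Pre_ excludes exactly the inputs on which Python A never returns: base = 0 with num ≠ 0
-- raises ZeroDivisionError, base = 1, base = -1 and (base ≥ 2 with num < 0) loop forever.
def Pre_deciToAnyBase (num : Int) (base : Int) : Prop :=
  num = 0 ∨ (2 ≤ base ∧ 0 ≤ num) ∨ base ≤ -2
instance (num : Int) (base : Int) : Decidable (Pre_deciToAnyBase num base) := by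
  unfold Pre_deciToAnyBase; infer_instance
def pvWitness_deciToAnyBase : Int × Int := (42, 5)

def Spec_deciToAnyBase (num : Int) (base : Int) (out : Int) : Prop := out = deciToAnyBase_alt num base
instance (num : Int) (base : Int) (out : Int) : Decidable (Spec_deciToAnyBase num base out) := by unfold Spec_deciToAnyBase; infer_instance

-- ===== CLAIM (what is proved, stated in full; the proofs are below) =====
def Claim_equal_deciToAnyBase : Prop := ∀ (num : Int) (base : Int), Dom_deciToAnyBase num base → Pre_deciToAnyBase num base → Spec_deciToAnyBase num base (deciToAnyBase num base)

-- ===== LEMMAS AND PROOFS =====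
-- Horner packing of the digit list: prepending a digit multiplies the rest by 10.
theorem pack_cons (d : Int) (l : List Int) :
    (d :: l).reverse.foldl (fun result x => result * 10 + x) 0
      = 10 * l.reverse.foldl (fun result x => result * 10 + x) 0 + d := by
  simp only [List.reverse_cons, List.foldl_append, List.foldl_cons, List.foldl_nil]
  ring

-- A's loop state equals baseNum plus 10^x times the Horner-packed digit list.
theorem deciToAnyBaseLoop_eq (fuel : Nat) :
    ∀ (num baseNum : Int) (x : Nat) (base : Int),
      deciToAnyBaseLoop fuel num baseNum x base
        = baseNum + (10 : Int) ^ x *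
            (deciDigits fuel num base).reverse.foldl (fun result d => result * 10 + d) 0 := by
  induction fuel with
  | zero => intro num baseNum x base; simp [deciToAnyBaseLoop, deciDigits]
  | succ n ih =>
    intro num baseNum x base
    simp only [deciToAnyBaseLoop, deciDigits]
    by_cases h : num = 0
    · simp [h]
    · rw [ih]
      simp only [h, beq_iff_eq, if_false, pack_cons]
      ring

-- ===== VERDICT (by name: the statement is the Claim_ definition above) =====
theorem deciToAnyBase_spec : Claim_equal_deciToAnyBase := by
  intro num base _ _
  unfold Spec_deciToAnyBase deciToAnyBase deciToAnyBase_alt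
  rw [deciToAnyBaseLoop_eq]
  ring
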